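-- pv_equiv track=rewrite | github.com/daksh-cruv/temp-unisen-search-api | services/subject_recommendation/temppp.py | load_streams_and_get_subject_frequency
-- ===== SOURCE A (Python) =====
-- def load_streams_and_get_subject_frequency(data):
--     """This function generates a dictionary containing the frequency of occurrence
--     of each subject in the streams list to each of the subject in it.
--     Returns: Dictionary of Frequency of Subjects"""
--
--     all_streams = data.values()
--     subject_frequency = {}
--     for stream in all_streams:
--         for subject in stream:
--             if subject not in subject_frequency:
--                 subject_frequency[subject] = {}
--             for other_subject in stream:
--                 if other_subject != subject:
--                     subject_frequency[subject][other_subject] = subject_frequency[subject].get(other_subject, 0) + 1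
--     return subject_frequency
-- ===== SOURCE B (Python) =====
-- def load_streams_and_get_subject_frequency(data):
--     """Count each subject once per stream, then accumulate pairwise products of the
--     distinct-value counts, instead of scanning all positional pairs."""
--     subject_frequency = {}
--     for stream in data.values():
--         counts = {}
--         for x in stream:
--             counts[x] = counts.get(x, 0) + 1
--         for s in counts:
--             subject_frequency.setdefault(s, {})
--         for s, cs in counts.items():
--             row = subject_frequency[s]
--             for o, co in counts.items():
--                 if o != s:
--                     row[o] = row.get(o, 0) + cs * co
--     return subject_frequency
-- ===== Notes on version B (the rewrite author's own statement) =====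
-- stated objective: alternative
-- what changed: A rescans all positional pairs of each stream (one full inner scan per occurrence, including duplicates); B builds a per-stream counter once and does a single pairwise pass over the distinct subject values, adding count(s)*count(o) per pair.
import Mathlib
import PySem

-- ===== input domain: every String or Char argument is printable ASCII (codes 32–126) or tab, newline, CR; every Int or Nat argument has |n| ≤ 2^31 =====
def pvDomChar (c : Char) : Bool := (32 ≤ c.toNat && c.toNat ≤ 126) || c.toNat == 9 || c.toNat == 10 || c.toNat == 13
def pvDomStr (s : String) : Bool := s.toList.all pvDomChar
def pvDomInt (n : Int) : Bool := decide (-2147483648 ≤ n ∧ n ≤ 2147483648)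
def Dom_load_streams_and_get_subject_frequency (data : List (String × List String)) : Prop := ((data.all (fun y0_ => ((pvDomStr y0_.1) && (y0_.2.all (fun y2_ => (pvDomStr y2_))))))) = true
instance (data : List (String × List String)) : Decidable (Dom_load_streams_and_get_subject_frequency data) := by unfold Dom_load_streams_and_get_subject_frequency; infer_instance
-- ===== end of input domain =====

-- B replaces A's positional pairwise rescans by one per-stream counter of distinct
-- subjects and a single pairwise pass over the distinct values (alternative algorithm).

-- ===== PORT A =====
def load_streams_and_get_subject_frequency (data : List (String × List String)) : List (String × List (String × Int)) :=
  let all_streams := (PySem.Dict.mk data).values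
  let subject_frequency : PySem.Dict String (PySem.Dict String Int) :=
    all_streams.foldl (fun sf stream =>
      stream.foldl (fun sf subject =>
        let sf := if sf.contains subject then sf else sf.insert subject PySem.Dict.empty
        stream.foldl (fun sf other_subject =>
          if other_subject ≠ subject then
            sf.modify subject PySem.Dict.empty
              (fun row => row.insert other_subject (row.getD other_subject 0 + 1))
          else sf) sf) sf) PySem.Dict.empty
  subject_frequency.items.map (fun p => (p.1, p.2.items))

-- ===== PORT B =====
def load_streams_and_get_subject_frequency_alt (data : List (String × List String)) : List (String × List (String × Int)) :=
  let subject_frequency : PySem.Dict String (PySem.Dict String Int) :=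
    ((PySem.Dict.mk data).values).foldl (fun sf stream =>
      let counts : PySem.Dict String Int :=
        stream.foldl (fun c x => c.modify x 0 (· + 1)) PySem.Dict.empty
      let sf := counts.keys.foldl (fun sf s => sf.setdefault s PySem.Dict.empty) sf
      counts.items.foldl (fun sf p =>
        counts.items.foldl (fun sf q =>
          if q.1 ≠ p.1 then
            sf.modify p.1 PySem.Dict.empty
              (fun row => row.insert q.1 (row.getD q.1 0 + p.2 * q.2))
          else sf) sf) sf) PySem.Dict.empty
  subject_frequency.items.map (fun p => (p.1, p.2.items))

-- ===== PRECONDITION & SPEC =====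
def Spec_load_streams_and_get_subject_frequency (data : List (String × List String)) (out : List (String × List (String × Int))) : Prop := out = load_streams_and_get_subject_frequency_alt data
instance (data : List (String × List String)) (out : List (String × List (String × Int))) : Decidable (Spec_load_streams_and_get_subject_frequency data out) := by unfold Spec_load_streams_and_get_subject_frequency; infer_instance

-- ===== CLAIM (what is proved, stated in full; the proofs are below) =====
def Claim_equal_load_streams_and_get_subject_frequency : Prop := ∀ (data : List (String × List String)), Dom_load_streams_and_get_subject_frequency data → Spec_load_streams_and_get_subject_frequency data (load_streams_and_get_subject_frequency data)

-- ===== LEMMAS AND PROOFS =====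

theorem pv_insert_getD_self {κ ν : Type} [BEq κ] [LawfulBEq κ] (d : PySem.Dict κ ν) (k : κ) (d0 : ν)
    (hnd : d.keys.Nodup) (hk : d.contains k = true) : d.insert k (d.getD k d0) = d := by
  apply PySem.Dict.ext
  rw [PySem.Dict.items_insert_of_contains d _ hk]
  have h : ∀ p ∈ d.items, (if (p.1 == k) = true then (k, d.getD k d0) else p) = p := by
    intro p hp
    obtain ⟨a, b⟩ := p
    by_cases h1 : a = k
    · subst h1
      have hv : d.getD a d0 = b := PySem.Dict.getD_of_mem_items d hp hnd d0
      simp [hv]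
    · simp [h1]
  calc List.map (fun p => if (p.1 == k) = true then (k, d.getD k d0) else p) d.items
      = List.map id d.items := List.map_congr_left h
    _ = d.items := List.map_id d.items

theorem pv_modify_modify_self {κ ν : Type} [BEq κ] [LawfulBEq κ] (d : PySem.Dict κ ν) (k : κ) (d0 : ν)
    (f g : ν → ν) : (d.modify k d0 f).modify k d0 g = d.modify k d0 (fun v => g (f v)) := by
  show (d.insert k (f (d.getD k d0))).insert k (g ((d.insert k (f (d.getD k d0))).getD k d0)) = _
  rw [PySem.Dict.getD_insert_self, PySem.Dict.insert_insert_self]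
  rfl

theorem pv_contains_modify_self {κ ν : Type} [BEq κ] [LawfulBEq κ] (d : PySem.Dict κ ν) (k : κ) (d0 : ν)
    (f : ν → ν) : (d.modify k d0 f).contains k = true := by
  show (d.insert k _).contains k = true
  rw [PySem.Dict.contains_insert]; simp

theorem pv_nodup_insert {κ ν : Type} [BEq κ] [LawfulBEq κ] (d : PySem.Dict κ ν) (k : κ) (v : ν)
    (hnd : d.keys.Nodup) : (d.insert k v).keys.Nodup := by
  by_cases hc : d.contains k = true
  · rw [PySem.Dict.keys_insert_of_contains d v hc]; exact hnd
  · rw [PySem.Dict.keys_insert_of_not_contains d v (by simpa using hc)]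
    have hk : k ∉ d.keys := by
      intro h; exact hc ((PySem.Dict.contains_iff_mem_keys d k).2 h)
    refine List.Nodup.append hnd (List.nodup_singleton k) ?_
    intro a ha hb
    simp only [List.mem_singleton] at hb
    exact hk (hb ▸ ha)

theorem pv_nodup_modify {κ ν : Type} [BEq κ] [LawfulBEq κ] (d : PySem.Dict κ ν) (k : κ) (d0 : ν)
    (f : ν → ν) (hnd : d.keys.Nodup) : (d.modify k d0 f).keys.Nodup :=
  pv_nodup_insert d k _ hnd

theorem pv_insert_comm {κ ν : Type} [BEq κ] [LawfulBEq κ] (d : PySem.Dict κ ν) (k k' : κ) (v w : ν)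
    (hk : d.contains k = true) (hne : k' ≠ k) :
    (d.insert k v).insert k' w = (d.insert k' w).insert k v := by
  have hk2 : (d.insert k' w).contains k = true := by
    rw [PySem.Dict.contains_insert]; simp [hk]
  apply PySem.Dict.ext
  by_cases hc : d.contains k' = true
  · have hc2 : (d.insert k v).contains k' = true := by
      rw [PySem.Dict.contains_insert]; simp [hc]
    rw [PySem.Dict.items_insert_of_contains _ w hc2, PySem.Dict.items_insert_of_contains _ v hk,
        PySem.Dict.items_insert_of_contains _ v hk2, PySem.Dict.items_insert_of_contains _ w hc]
    simp only [List.map_map]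
    apply List.map_congr_left
    intro p _
    by_cases h1 : p.1 = k <;> by_cases h2 : p.1 = k' <;>
      simp [Function.comp, h1, h2, hne, Ne.symm hne]
  · have hc2 : (d.insert k v).contains k' = false := by
      rw [PySem.Dict.contains_insert]
      simp only [Bool.or_eq_false_iff]
      exact ⟨by simp [hne], by simpa using hc⟩
    rw [PySem.Dict.items_insert_of_not_contains _ w hc2, PySem.Dict.items_insert_of_contains _ v hk,
        PySem.Dict.items_insert_of_contains _ v hk2, PySem.Dict.items_insert_of_not_contains _ w (by simpa using hc)]
    rw [List.map_append]
    simp [hne]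

theorem pv_modify_comm {κ ν : Type} [BEq κ] [LawfulBEq κ] (d : PySem.Dict κ ν) (k k' : κ) (d0 d0' : ν)
    (f g : ν → ν) (hk : d.contains k = true) (hne : k' ≠ k) :
    (d.modify k d0 f).modify k' d0' g = (d.modify k' d0' g).modify k d0 f := by
  show (d.insert k (f (d.getD k d0))).insert k' (g ((d.insert k (f (d.getD k d0))).getD k' d0')) =
       (d.insert k' (g (d.getD k' d0'))).insert k (f ((d.insert k' (g (d.getD k' d0'))).getD k d0))
  rw [PySem.Dict.getD_insert_of_ne _ _ _ hne, PySem.Dict.getD_insert_of_ne _ _ _ (Ne.symm hne)]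
  exact pv_insert_comm d k k' _ _ hk hne

theorem pv_modify_setdefault_comm {κ ν : Type} [BEq κ] [LawfulBEq κ] (d : PySem.Dict κ ν) (k t : κ)
    (d0 v0 : ν) (f : ν → ν) (hk : d.contains k = true) :
    (d.setdefault t v0).modify k d0 f = (d.modify k d0 f).setdefault t v0 := by
  by_cases hc : d.contains t = true
  · rw [PySem.Dict.setdefault_of_contains d v0 hc,
        PySem.Dict.setdefault_of_contains _ v0 (by rw [PySem.Dict.contains_modify]; simp [hc])]
  · have hnt : t ≠ k := fun h => hc (h ▸ hk)
    rw [PySem.Dict.setdefault_of_not_contains d v0 (by simpa using hc)]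
    have hc2 : (d.modify k d0 f).contains t = false := by
      rw [PySem.Dict.contains_modify]
      simp [hnt, (by simpa using hc : d.contains t = false)]
    rw [PySem.Dict.setdefault_of_not_contains _ v0 hc2]
    show (d.insert t v0).insert k (f ((d.insert t v0).getD k d0)) = (d.insert k (f (d.getD k d0))).insert t v0
    rw [PySem.Dict.getD_insert_of_ne _ _ _ (Ne.symm hnt)]
    exact (pv_insert_comm d k t _ v0 hk hnt).symm

theorem pv_setdefault_modify {κ ν : Type} [BEq κ] [LawfulBEq κ] (d : PySem.Dict κ ν) (k : κ) (v0 : ν)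
    (f : ν → ν) : (d.setdefault k v0).modify k v0 f = d.modify k v0 f := by
  by_cases hc : d.contains k = true
  · rw [PySem.Dict.setdefault_of_contains d v0 hc]
  · rw [PySem.Dict.setdefault_of_not_contains d v0 (by simpa using hc)]
    show (d.insert k v0).insert k (f ((d.insert k v0).getD k v0)) = d.insert k (f (d.getD k v0))
    rw [PySem.Dict.getD_insert_self, PySem.Dict.insert_insert_self,
        PySem.Dict.getD_of_not_contains d v0 (by simpa using hc)]

theorem pv_ensure_modify {κ ν : Type} [BEq κ] [LawfulBEq κ] (d : PySem.Dict κ ν) (k : κ) (v0 : ν)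
    (f : ν → ν) : (if d.contains k then d else d.insert k v0).modify k v0 f = d.modify k v0 f := by
  by_cases hc : d.contains k = true
  · simp [hc]
  · simp only [hc]
    show (d.insert k v0).insert k (f ((d.insert k v0).getD k v0)) = d.insert k (f (d.getD k v0))
    rw [PySem.Dict.getD_insert_self, PySem.Dict.insert_insert_self,
        PySem.Dict.getD_of_not_contains d v0 (by simpa using hc)]

theorem pv_nodup_setdefault {κ ν : Type} [BEq κ] [LawfulBEq κ] (d : PySem.Dict κ ν) (k : κ) (v0 : ν)
    (hnd : d.keys.Nodup) : (d.setdefault k v0).keys.Nodup := by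
  by_cases hc : d.contains k = true
  · rw [PySem.Dict.setdefault_of_contains d v0 hc]; exact hnd
  · rw [PySem.Dict.setdefault_of_not_contains d v0 (by simpa using hc)]
    rw [PySem.Dict.keys_insert_of_not_contains d v0 (by simpa using hc)]
    refine List.Nodup.append hnd (List.nodup_singleton k) ?_
    intro a ha hb
    simp only [List.mem_singleton] at hb
    exact (fun h => hc ((PySem.Dict.contains_iff_mem_keys d k).2 h)) (hb ▸ ha)

theorem pv_sd_chain_modify {κ ν : Type} [BEq κ] [LawfulBEq κ] (ks : List κ) :
    ∀ (d : PySem.Dict κ ν) (k : κ) (d0 v0 : ν) (f : ν → ν), d.contains k = true →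
    (ks.foldl (fun d t => d.setdefault t v0) d).modify k d0 f
      = ks.foldl (fun d t => d.setdefault t v0) (d.modify k d0 f) := by
  induction ks with
  | nil => intro d k d0 v0 f _; rfl
  | cons t ks ih =>
    intro d k d0 v0 f hk
    simp only [List.foldl_cons]
    rw [ih _ k d0 v0 f (by rw [PySem.Dict.contains_setdefault]; simp [hk]),
        pv_modify_setdefault_comm d k t d0 v0 f hk]

theorem pv_sd_fuse {κ ν : Type} [BEq κ] [LawfulBEq κ] (ks : List κ) :
    ∀ (d : PySem.Dict κ ν) (v0 : ν) (B : κ → ν → ν),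
    ks.foldl (fun d s => d.modify s v0 (B s)) (ks.foldl (fun d t => d.setdefault t v0) d)
      = ks.foldl (fun d s => d.modify s v0 (B s)) d := by
  induction ks with
  | nil => intro d v0 B; rfl
  | cons s ks ih =>
    intro d v0 B
    simp only [List.foldl_cons]
    rw [pv_sd_chain_modify ks (d.setdefault s v0) s v0 v0 (B s)
          (by rw [PySem.Dict.contains_setdefault]; simp),
        pv_setdefault_modify d s v0 (B s), ih (d.modify s v0 (B s)) v0 B]

theorem pv_if_skip {α β : Type} (l : List α) (p : α → Prop) [DecidablePred p] (f : β → α → β) :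
    ∀ (init : β), l.foldl (fun a x => if p x then f a x else a) init
      = (l.filter (fun x => decide (p x))).foldl f init := by
  induction l with
  | nil => intro init; rfl
  | cons x l ih =>
    intro init
    by_cases h : p x
    · simp [h, ih]
    · simp [h, ih]

theorem pv_fold_modify_same {κ ν α : Type} [BEq κ] [LawfulBEq κ] (l : List α) :
    ∀ (d : PySem.Dict κ ν) (k : κ) (d0 : ν) (step : ν → α → ν),
    d.contains k = true → d.keys.Nodup →
    l.foldl (fun d o => d.modify k d0 (fun r => step r o)) d
      = d.modify k d0 (fun r => l.foldl step r) := by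
  induction l with
  | nil =>
    intro d k d0 step hk hnd
    show d = d.insert k (d.getD k d0)
    exact (pv_insert_getD_self d k d0 hnd hk).symm
  | cons o l ih =>
    intro d k d0 step hk hnd
    simp only [List.foldl_cons]
    rw [ih (d.modify k d0 (fun r => step r o)) k d0 step (pv_contains_modify_self d k d0 _)
          (pv_nodup_modify d k d0 _ hnd),
        pv_modify_modify_self d k d0 _ _]

theorem pv_discard_eq_filter {α : Type} [BEq α] [LawfulBEq α] [DecidableEq α] (s : PySem.Set α) (x : α) :
    s.discard x = s.filter (fun t => decide (t ≠ x)) := by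
  show s.filter (fun t => !(t == x)) = s.filter (fun t => decide (t ≠ x))
  apply List.filter_congr
  intro a _
  by_cases h : a = x <;> simp [h]

theorem pv_pull {κ ν : Type} [BEq κ] [LawfulBEq κ] [DecidableEq κ] (g : κ → ν → ν) (x : κ) (d0 : ν) :
    ∀ (ks : List κ) (d : PySem.Dict κ ν) (f₀ : ν → ν), ks.Nodup → x ∈ ks →
      d.contains x = true →
    ks.foldl (fun d t => d.modify t d0 (g t)) (d.modify x d0 f₀)
      = (ks.filter (fun t => decide (t ≠ x))).foldl (fun d t => d.modify t d0 (g t))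
          (d.modify x d0 (fun v => g x (f₀ v))) := by
  intro ks
  induction ks with
  | nil => intro d f₀ _ hx _; exact absurd hx List.not_mem_nil
  | cons t ks ih =>
    intro d f₀ hnd hx hcx
    rw [List.filter_cons]
    by_cases ht : t = x
    · subst ht
      have hts : t ∉ ks := (List.nodup_cons.1 hnd).1
      have hfk : ks.filter (fun u => decide (u ≠ t)) = ks :=
        List.filter_eq_self.2 (fun a ha => by
          simp only [ne_eq, decide_eq_true_eq]; exact fun h => hts (h ▸ ha))
      rw [if_neg (by simp), hfk]
      simp only [List.foldl_cons]
      rw [pv_modify_modify_self d t d0 f₀ (g t)]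
    · have hx' : x ∈ ks := (List.mem_cons.1 hx).resolve_left (fun h => ht h.symm)
      rw [if_pos (by simp [ht])]
      simp only [List.foldl_cons]
      rw [pv_modify_comm d x t d0 d0 f₀ (g t) hcx ht,
          ih (d.modify t d0 (g t)) f₀ (List.nodup_cons.1 hnd).2 hx'
            (by rw [PySem.Dict.contains_modify]; simp [hcx]),
          pv_modify_comm d x t d0 d0 _ (g t) hcx ht]

theorem pv_group {κ ν : Type} [BEq κ] [LawfulBEq κ] [DecidableEq κ] (g : κ → ν → ν) (d0 : ν) :
    ∀ (l : List κ) (d : PySem.Dict κ ν),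
    l.foldl (fun d t => d.modify t d0 (g t)) d
      = (PySem.Set.ofList l).foldl (fun d t => d.modify t d0 ((g t)^[l.count t])) d := by
  intro l
  induction l with
  | nil => intro d; simp [PySem.Set.ofList_nil]
  | cons x l ih =>
    intro d
    simp only [List.foldl_cons]
    rw [ih (d.modify x d0 (g x)), PySem.Set.ofList_cons, pv_discard_eq_filter]
    by_cases hx : x ∈ l
    · -- pull the x-entry of the chain forward and merge it with the head modify
      have hme : d.modify x d0 (g x) = (if d.contains x then d else d.insert x d0).modify x d0 (g x) :=
        (pv_ensure_modify d x d0 (g x)).symm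
      have hce : (if d.contains x then d else d.insert x d0).contains x = true := by
        by_cases hc : d.contains x = true
        · simp [hc]
        · simp only [hc, if_false, Bool.false_eq_true]
          rw [PySem.Dict.contains_insert]; simp
      rw [hme, pv_pull (fun t => (g t)^[l.count t]) x d0 (PySem.Set.ofList l)
            _ (g x) (PySem.Set.nodup_ofList l) ((PySem.Set.mem_ofList l x).2 hx) hce]
      have hmerge : (fun v => (g x)^[l.count x] (g x v)) = (g x)^[(x :: l).count x] := by
        funext v
        rw [← Function.iterate_succ_apply (g x) (l.count x) v, List.count_cons_self]
      rw [hmerge, pv_ensure_modify d x d0 ((g x)^[(x :: l).count x])]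
      simp only [List.foldl_cons]
      apply PySem.List.foldl_congr_mem
      intro acc u hu
      have hu' : u ≠ x := by
        rcases List.mem_filter.1 hu with ⟨_, h2⟩
        simpa using h2
      have hcnt : List.count u (x :: l) = List.count u l := by
        simp only [List.count_cons, beq_iff_eq]
        simp [Ne.symm hu']
      rw [hcnt]
    · have hfe : (PySem.Set.ofList l).filter (fun t => decide (t ≠ x)) = PySem.Set.ofList l :=
        List.filter_eq_self.2 (fun a ha => by
          simp only [ne_eq, decide_eq_true_eq]
          intro h; subst h; exact hx ((PySem.Set.mem_ofList l a).1 ha))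
      rw [hfe]
      simp only [List.foldl_cons]
      have hcount : (x :: l).count x = 1 := by
        rw [List.count_cons_self, List.count_eq_zero.2 hx]
      rw [hcount]
      have : (g x)^[1] = g x := Function.iterate_one (g x)
      rw [this]
      apply PySem.List.foldl_congr_mem
      intro acc u hu
      have hu' : u ≠ x := by intro h; subst h; exact hx ((PySem.Set.mem_ofList l u).1 hu)
      have hcnt : List.count u (x :: l) = List.count u l := by
        simp only [List.count_cons, beq_iff_eq]
        simp [Ne.symm hu']
      rw [hcnt]

theorem pv_iter_add_one (m : Nat) (v : Int) : (fun x : Int => x + 1)^[m] v = v + (m : Int) := by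
  induction m generalizing v with
  | zero => simp
  | succ n ih =>
    rw [Function.iterate_succ_apply, ih]
    push_cast; ring

theorem pv_iter_foldl {α β : Type} (l : List α) (step : β → α → β) (n : Nat) :
    ∀ (r : β), (fun r => l.foldl step r)^[n] r = ((List.replicate n l).flatten).foldl step r := by
  induction n with
  | zero => intro r; simp
  | succ m ih =>
    intro r
    rw [Function.iterate_succ_apply, ih (l.foldl step r), List.replicate_succ,
        List.flatten_cons, List.foldl_append]

theorem pv_count_flatten_replicate {α : Type} [BEq α] [LawfulBEq α] (l : List α) (n : Nat) (o : α) :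
    ((List.replicate n l).flatten).count o = n * l.count o := by
  induction n with
  | zero => simp
  | succ m ih =>
    rw [List.replicate_succ, List.flatten_cons, List.count_append, ih]
    ring

theorem pv_ofList_flatten_replicate {α : Type} [BEq α] [LawfulBEq α] (l : List α) (n : Nat) (hn : 1 ≤ n) :
    PySem.Set.ofList ((List.replicate n l).flatten) = PySem.Set.ofList l := by
  obtain ⟨m, rfl⟩ : ∃ m, n = m + 1 := ⟨n - 1, by omega⟩
  rw [List.replicate_succ, List.flatten_cons, PySem.Set.ofList_append,
      PySem.Set.update_eq_append_filter]
  have h : List.filter (fun y => !(PySem.Set.ofList l).contains y)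
      (PySem.Set.ofList (List.replicate m l).flatten) = [] := by
    rw [List.filter_eq_nil_iff]
    intro a ha
    have hal : a ∈ l := by
      have := (PySem.Set.mem_ofList _ a).1 ha
      rcases List.mem_flatten.1 this with ⟨t, ht, hat⟩
      rwa [List.eq_of_mem_replicate ht] at hat
    simpa using hal
  rw [h, List.append_nil]

theorem pv_ofList_filter {α : Type} [BEq α] [LawfulBEq α] (p : α → Bool) (l : List α) :
    PySem.Set.ofList (l.filter p) = (PySem.Set.ofList l).filter p := by
  induction l with
  | nil => simp [PySem.Set.ofList_nil]
  | cons x l ih =>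
    rw [List.filter_cons]
    by_cases hp : p x = true
    · rw [if_pos hp, PySem.Set.ofList_cons, PySem.Set.ofList_cons, ih]
      show _ = List.filter p (x :: List.filter (fun t => !(t == x)) (PySem.Set.ofList l))
      rw [List.filter_cons, if_pos hp]
      show x :: List.filter (fun t => !(t == x)) (List.filter p (PySem.Set.ofList l)) = _
      rw [List.filter_filter, List.filter_filter]
      congr 1
      apply List.filter_congr
      intro a _
      rw [Bool.and_comm]
    · rw [if_neg hp, ih, PySem.Set.ofList_cons]
      show List.filter p (PySem.Set.ofList l) = List.filter p (x :: List.filter (fun t => !(t == x)) (PySem.Set.ofList l))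
      rw [List.filter_cons, if_neg hp, List.filter_filter]
      apply List.filter_congr
      intro a _
      by_cases ha : a = x
      · subst ha; simp [hp]
      · simp [ha]


-- ===== assembly on String tables =====

-- the per-subject row update A performs for one occurrence of s in a stream
def pvRowA (st : List String) (s : String) : PySem.Dict String Int → PySem.Dict String Int :=
  fun r => (st.filter (fun o => decide (o ≠ s))).foldl (fun r o => r.insert o (r.getD o 0 + 1)) r

-- the per-subject row update B performs once per distinct subject
def pvRowB (st : List String) (s : String) : PySem.Dict String Int → PySem.Dict String Int :=
  fun r => ((PySem.Set.ofList st).filter (fun o => decide (o ≠ s))).foldl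
    (fun r o => r.insert o (r.getD o 0 + (st.count s : Int) * (st.count o : Int))) r

-- one occurrence of subject s in A: ensure the key, then one positional pass
theorem pv_A_occ (st : List String) (s : String) (d : PySem.Dict String (PySem.Dict String Int))
    (hnd : d.keys.Nodup) :
    st.foldl (fun sf o => if o ≠ s then sf.modify s PySem.Dict.empty
        (fun row => row.insert o (row.getD o 0 + 1)) else sf)
      (if d.contains s then d else d.insert s PySem.Dict.empty)
    = d.modify s PySem.Dict.empty (pvRowA st s) := by
  have hce : (if d.contains s then d else d.insert s PySem.Dict.empty).contains s = true := by
    by_cases hc : d.contains s = true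
    · simp [hc]
    · simp only [hc, Bool.false_eq_true, if_false]
      rw [PySem.Dict.contains_insert]; simp
  have hne : (if d.contains s then d else d.insert s PySem.Dict.empty).keys.Nodup := by
    by_cases hc : d.contains s = true
    · simpa [hc]
    · simp only [hc, Bool.false_eq_true, if_false]
      exact pv_nodup_insert d s _ hnd
  refine ((pv_if_skip st (fun o => o ≠ s)
      (fun (sf : PySem.Dict String (PySem.Dict String Int)) o =>
        sf.modify s PySem.Dict.empty (fun row => row.insert o (row.getD o 0 + 1))) _).trans
    ?_)
  refine (pv_fold_modify_same (st.filter (fun o => decide (o ≠ s))) _ s PySem.Dict.empty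
      (fun r o => r.insert o (r.getD o 0 + 1)) hce hne).trans ?_
  exact pv_ensure_modify d s PySem.Dict.empty _

theorem pv_A_chain (st : List String) : ∀ (occ : List String) (d : PySem.Dict String (PySem.Dict String Int)),
    d.keys.Nodup →
    occ.foldl (fun sf subject =>
      st.foldl (fun sf other => if other ≠ subject then sf.modify subject PySem.Dict.empty
          (fun row => row.insert other (row.getD other 0 + 1)) else sf)
        (if sf.contains subject then sf else sf.insert subject PySem.Dict.empty)) d
    = occ.foldl (fun d s => d.modify s PySem.Dict.empty (pvRowA st s)) d := by
  intro occ
  induction occ with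
  | nil => intro d _; rfl
  | cons s occ ih =>
    intro d hnd
    simp only [List.foldl_cons]
    rw [pv_A_occ st s d hnd, ih _ (pv_nodup_modify d s _ _ hnd)]

-- count s many positional passes for s collapse into B's single weighted pass
theorem pv_row_eq (st : List String) (s : String) (hs : s ∈ st) (r : PySem.Dict String Int) :
    (pvRowA st s)^[st.count s] r = pvRowB st s r := by
  have hn : 1 ≤ st.count s := List.count_pos_iff.2 hs
  show (fun r => (st.filter (fun o => decide (o ≠ s))).foldl
      (fun r o => r.insert o (r.getD o 0 + 1)) r)^[st.count s] r = _
  rw [pv_iter_foldl]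
  show ((List.replicate (st.count s) (st.filter (fun o => decide (o ≠ s)))).flatten).foldl
      (fun r o => r.modify o 0 (· + 1)) r = _
  rw [pv_group (fun _ => ((· + 1) : Int → Int)) 0, pv_ofList_flatten_replicate _ _ hn,
      pv_ofList_filter]
  show _ = ((PySem.Set.ofList st).filter (fun o => decide (o ≠ s))).foldl
      (fun r o => r.insert o (r.getD o 0 + (st.count s : Int) * (st.count o : Int))) r
  apply PySem.List.foldl_congr_mem
  intro acc o ho
  have ho' : o ≠ s := by
    rcases List.mem_filter.1 ho with ⟨_, h⟩
    simpa using h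
  have hc1 : ((List.replicate (st.count s) (st.filter (fun o => decide (o ≠ s)))).flatten).count o
      = st.count s * st.count o := by
    rw [pv_count_flatten_replicate, List.count_filter (by simp [ho'])]
  rw [hc1]
  show acc.insert o ((fun x : Int => x + 1)^[st.count s * st.count o] (acc.getD o 0))
      = acc.insert o (acc.getD o 0 + (st.count s : Int) * (st.count o : Int))
  rw [pv_iter_add_one]
  push_cast
  rfl

theorem pv_B_chain (st : List String) : ∀ (ks : List String) (d : PySem.Dict String (PySem.Dict String Int)),
    d.keys.Nodup → (∀ s ∈ ks, d.contains s = true) →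
    ks.foldl (fun sf s =>
      (PySem.Set.ofList st).foldl (fun sf o =>
        if o ≠ s then sf.modify s PySem.Dict.empty
          (fun row => row.insert o (row.getD o 0 + (st.count s : Int) * (st.count o : Int))) else sf) sf) d
    = ks.foldl (fun d s => d.modify s PySem.Dict.empty (pvRowB st s)) d := by
  intro ks
  induction ks with
  | nil => intro d _ _; rfl
  | cons s ks ih =>
    intro d hnd hcs
    simp only [List.foldl_cons]
    have h1 : ((PySem.Set.ofList st).foldl (fun sf o =>
        if o ≠ s then sf.modify s PySem.Dict.empty
          (fun row => row.insert o (row.getD o 0 + (st.count s : Int) * (st.count o : Int))) else sf) d)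
        = d.modify s PySem.Dict.empty (pvRowB st s) :=
      (pv_if_skip (PySem.Set.ofList st) (fun o => o ≠ s)
          (fun (sf : PySem.Dict String (PySem.Dict String Int)) o =>
            sf.modify s PySem.Dict.empty (fun row =>
              row.insert o (row.getD o 0 + (st.count s : Int) * (st.count o : Int)))) _).trans
        (pv_fold_modify_same _ _ s PySem.Dict.empty
          (fun r o => r.insert o (r.getD o 0 + (st.count s : Int) * (st.count o : Int)))
          (hcs s (List.mem_cons_self)) hnd)
    rw [h1]
    exact ih _ (pv_nodup_modify d s _ _ hnd)
      (fun t ht => by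
        rw [PySem.Dict.contains_modify]
        simp [hcs t (List.mem_cons_of_mem s ht)])

theorem pv_sd_chain_nodup {κ ν : Type} [BEq κ] [LawfulBEq κ] (v0 : ν) :
    ∀ (ks : List κ) (d : PySem.Dict κ ν), d.keys.Nodup →
    (ks.foldl (fun d t => d.setdefault t v0) d).keys.Nodup := by
  intro ks
  induction ks with
  | nil => intro d h; exact h
  | cons t ks ih =>
    intro d h
    exact ih _ (pv_nodup_setdefault d t v0 h)

theorem pv_sd_chain_contains_mono {κ ν : Type} [BEq κ] [LawfulBEq κ] (v0 : ν) :
    ∀ (ks : List κ) (d : PySem.Dict κ ν) (t : κ), d.contains t = true →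
    (ks.foldl (fun d u => d.setdefault u v0) d).contains t = true := by
  intro ks
  induction ks with
  | nil => intro d t h; exact h
  | cons u ks ih =>
    intro d t h
    exact ih _ t (by rw [PySem.Dict.contains_setdefault]; simp [h])

theorem pv_sd_chain_contains {κ ν : Type} [BEq κ] [LawfulBEq κ] (v0 : ν) :
    ∀ (ks : List κ) (d : PySem.Dict κ ν) (t : κ), t ∈ ks →
    (ks.foldl (fun d u => d.setdefault u v0) d).contains t = true := by
  intro ks
  induction ks with
  | nil => intro d t h; exact absurd h List.not_mem_nil
  | cons u ks ih =>
    intro d t h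
    rcases List.mem_cons.1 h with h | h
    · subst h
      exact pv_sd_chain_contains_mono v0 ks _ t
        (by rw [PySem.Dict.contains_setdefault]; simp)
    · exact ih _ t h

theorem pv_modchain_nodup {κ ν : Type} [BEq κ] [LawfulBEq κ] (d0 : ν) (g : κ → ν → ν) :
    ∀ (ks : List κ) (d : PySem.Dict κ ν), d.keys.Nodup →
    (ks.foldl (fun d s => d.modify s d0 (g s)) d).keys.Nodup := by
  intro ks
  induction ks with
  | nil => intro d h; exact h
  | cons s ks ih =>
    intro d h
    exact ih _ (pv_nodup_modify d s d0 _ h)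

-- canonical per-stream effect: one weighted pass per distinct subject
def pvCanon (st : List String) (d : PySem.Dict String (PySem.Dict String Int)) :
    PySem.Dict String (PySem.Dict String Int) :=
  (PySem.Set.ofList st).foldl (fun d s => d.modify s PySem.Dict.empty (pvRowB st s)) d

theorem pv_A_eq_canon (st : List String) (d : PySem.Dict String (PySem.Dict String Int))
    (hnd : d.keys.Nodup) :
    st.foldl (fun sf subject =>
      st.foldl (fun sf other => if other ≠ subject then sf.modify subject PySem.Dict.empty
          (fun row => row.insert other (row.getD other 0 + 1)) else sf)
        (if sf.contains subject then sf else sf.insert subject PySem.Dict.empty)) d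
    = pvCanon st d := by
  rw [pv_A_chain st st d hnd, pv_group (pvRowA st) PySem.Dict.empty st d]
  apply PySem.List.foldl_congr_mem
  intro acc s hsm
  have hs : s ∈ st := (PySem.Set.mem_ofList st s).1 hsm
  show acc.insert s ((pvRowA st s)^[st.count s] (acc.getD s PySem.Dict.empty)) = _
  rw [pv_row_eq st s hs]
  rfl

theorem pv_B_eq_canon (st : List String) (d : PySem.Dict String (PySem.Dict String Int))
    (hnd : d.keys.Nodup) :
    (let counts := st.foldl (fun c x => c.modify x 0 (· + 1)) PySem.Dict.empty
     let sf := counts.keys.foldl (fun sf s => sf.setdefault s PySem.Dict.empty) d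
     counts.items.foldl (fun sf p =>
       counts.items.foldl (fun sf q =>
         if q.1 ≠ p.1 then sf.modify p.1 PySem.Dict.empty
           (fun row => row.insert q.1 (row.getD q.1 0 + p.2 * q.2)) else sf) sf) sf)
    = pvCanon st d := by
  show (let counts := PySem.Dict.counter st
        let sf := counts.keys.foldl (fun sf s => sf.setdefault s PySem.Dict.empty) d
        counts.items.foldl (fun sf p =>
          counts.items.foldl (fun sf q =>
            if q.1 ≠ p.1 then sf.modify p.1 PySem.Dict.empty
              (fun row => row.insert q.1 (row.getD q.1 0 + p.2 * q.2)) else sf) sf) sf) = _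
  simp only [PySem.Dict.keys_counter, PySem.Dict.items_counter, List.foldl_map]
  rw [pv_B_chain st (PySem.Set.ofList st) _
        (pv_sd_chain_nodup PySem.Dict.empty (PySem.Set.ofList st) d hnd)
        (fun t ht => pv_sd_chain_contains PySem.Dict.empty (PySem.Set.ofList st) d t ht),
      pv_sd_fuse (PySem.Set.ofList st) d PySem.Dict.empty (pvRowB st)]
  rfl

theorem pv_streams_eq : ∀ (streams : List (List String)) (d : PySem.Dict String (PySem.Dict String Int)),
    d.keys.Nodup →
    streams.foldl (fun sf stream =>
      stream.foldl (fun sf subject =>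
        stream.foldl (fun sf other_subject =>
          if other_subject ≠ subject then
            sf.modify subject PySem.Dict.empty
              (fun row => row.insert other_subject (row.getD other_subject 0 + 1))
          else sf)
        (if sf.contains subject then sf else sf.insert subject PySem.Dict.empty)) sf) d
    = streams.foldl (fun sf stream =>
      let counts : PySem.Dict String Int :=
        stream.foldl (fun c x => c.modify x 0 (· + 1)) PySem.Dict.empty
      let sf := counts.keys.foldl (fun sf s => sf.setdefault s PySem.Dict.empty) sf
      counts.items.foldl (fun sf p =>
        counts.items.foldl (fun sf q =>
          if q.1 ≠ p.1 then
            sf.modify p.1 PySem.Dict.empty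
              (fun row => row.insert q.1 (row.getD q.1 0 + p.2 * q.2))
          else sf) sf) sf) d := by
  intro streams
  induction streams with
  | nil => intro d _; rfl
  | cons st streams ih =>
    intro d hnd
    simp only [List.foldl_cons]
    rw [pv_A_eq_canon st d hnd, pv_B_eq_canon st d hnd]
    exact ih (pvCanon st d)
      (pv_modchain_nodup PySem.Dict.empty (pvRowB st) (PySem.Set.ofList st) d hnd)

-- ===== VERDICT (by name: the statement is the Claim_ definition above) =====
theorem load_streams_and_get_subject_frequency_spec : Claim_equal_load_streams_and_get_subject_frequency := by
  intro data _
  unfold Spec_load_streams_and_get_subject_frequency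
  unfold load_streams_and_get_subject_frequency load_streams_and_get_subject_frequency_alt
  exact congrArg (fun t : PySem.Dict String (PySem.Dict String Int) =>
      t.items.map (fun p => (p.1, p.2.items)))
    (pv_streams_eq ((PySem.Dict.mk data).values) PySem.Dict.empty PySem.Dict.nodup_keys_empty)
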